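-- pv_equiv track=rewrite | github.com/batya1871/EHT | EHTSite/EyeHealth/services.py | get_percentage_mgs
-- ===== SOURCE A (Python) =====
-- def get_percentage_mgs(percentage, diff_level):
--     percentage_thresholds = {
--         "easy": [(90, "Отличный результат!"), (70, "Хороший результат"), (60, "В пределах нормы")],
--         "medium": [(80, "Отличный результат!"), (60, "Хороший результат"), (50, "В пределах нормы")],
--         "hard": [(70, "Отличный результат!"), (50, "Хороший результат"), (40, "В пределах нормы")]
--     }
--     for threshold, percentage_mgs in percentage_thresholds[diff_level.split("_")[0]]:
--         if percentage >= threshold: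
--             return percentage_mgs
--     return "Ниже нормы"
-- ===== SOURCE B (Python) =====
-- def get_percentage_mgs(percentage, diff_level):
--     # Normalize the score to the "easy" scale, count the base thresholds it
--     # reaches, and index into a rank->message list (no per-level table, no
--     # early-return scan).
--     score = percentage + {"easy": 0, "medium": 10, "hard": 20}[diff_level.split("_")[0]]
--     rank = sum(1 for t in (60, 70, 90) if score >= t)
--     return ["Ниже нормы", "В пределах нормы", "Хороший результат", "Отличный результат!"][rank]
-- ===== Notes on version B (the rewrite author's own statement) =====
-- stated objective: alternative
-- what changed: Instead of scanning a per-level descending threshold table with early return, B normalizes the score by a level offset onto one base scale, counts how many base thresholds (60,70,90) it reaches, and indexes that count into a rank-to-message list.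
import Mathlib
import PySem

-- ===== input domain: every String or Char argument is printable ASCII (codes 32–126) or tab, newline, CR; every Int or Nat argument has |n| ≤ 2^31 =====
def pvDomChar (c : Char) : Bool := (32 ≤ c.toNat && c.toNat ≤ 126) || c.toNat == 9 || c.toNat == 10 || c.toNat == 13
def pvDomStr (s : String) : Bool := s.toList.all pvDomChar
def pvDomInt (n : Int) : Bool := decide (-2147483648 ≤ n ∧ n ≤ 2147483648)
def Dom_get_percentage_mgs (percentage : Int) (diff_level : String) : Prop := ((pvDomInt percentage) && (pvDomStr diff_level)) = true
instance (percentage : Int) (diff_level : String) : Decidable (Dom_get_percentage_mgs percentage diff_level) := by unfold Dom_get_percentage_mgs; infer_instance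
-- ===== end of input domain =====

-- B normalizes the score by a level offset, counts base thresholds reached, and indexes a rank→message list; same return values as A everywhere A returns.
-- ===== PORT A =====
def pvKey (diff_level : String) : String :=
  ((PySem.Str.split? diff_level "_").getD []).getD 0 ""

def pvFindMsg (p : Int) : List (Int × String) → String
  | [] => "Ниже нормы"
  | (t, m) :: rest => if p ≥ t then m else pvFindMsg p rest

def get_percentage_mgs (percentage : Int) (diff_level : String) : String :=
  let table : PySem.Dict String (List (Int × String)) := PySem.Dict.ofList
    [("easy", [(90, "Отличный результат!"), (70, "Хороший результат"), (60, "В пределах нормы")]),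
     ("medium", [(80, "Отличный результат!"), (60, "Хороший результат"), (50, "В пределах нормы")]),
     ("hard", [(70, "Отличный результат!"), (50, "Хороший результат"), (40, "В пределах нормы")])]
  match PySem.Dict.get? table (pvKey diff_level) with
  | some lst => pvFindMsg percentage lst
  | none => ""  -- KeyError in Python; excluded by Pre_

-- ===== PORT B =====
def get_percentage_mgs_alt (percentage : Int) (diff_level : String) : String :=
  match PySem.Dict.get? (PySem.Dict.ofList [("easy", (0:Int)), ("medium", 10), ("hard", 20)])
      (pvKey diff_level) with
  | none => ""  -- KeyError in Python; excluded by Pre_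
  | some off =>
    let score := percentage + off
    let rank := ([60, 70, 90] : List Int).countP (fun t => score ≥ t)
    (["Ниже нормы", "В пределах нормы", "Хороший результат", "Отличный результат!"].getD rank "")

-- ===== PRECONDITION & SPEC =====
-- Pre_ excludes exactly the inputs where diff_level.split("_")[0] is not a known level, on which A raises KeyError.
def Pre_get_percentage_mgs (percentage : Int) (diff_level : String) : Prop :=
  pvKey diff_level ∈ (["easy", "medium", "hard"] : List String)
instance (percentage : Int) (diff_level : String) : Decidable (Pre_get_percentage_mgs percentage diff_level) := by unfold Pre_get_percentage_mgs; infer_instance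
def pvWitness_get_percentage_mgs : Int × String := (75, "medium_mode")
def Spec_get_percentage_mgs (percentage : Int) (diff_level : String) (out : String) : Prop := out = get_percentage_mgs_alt percentage diff_level
instance (percentage : Int) (diff_level : String) (out : String) : Decidable (Spec_get_percentage_mgs percentage diff_level out) := by unfold Spec_get_percentage_mgs; infer_instance

-- ===== CLAIM =====
def Claim_equal_get_percentage_mgs : Prop := ∀ (percentage : Int) (diff_level : String), Dom_get_percentage_mgs percentage diff_level → Pre_get_percentage_mgs percentage diff_level → Spec_get_percentage_mgs percentage diff_level (get_percentage_mgs percentage diff_level)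

-- ===== LEMMAS AND PROOFS =====

-- ===== VERDICT =====
theorem get_percentage_mgs_spec : Claim_equal_get_percentage_mgs := by
  intro p d _ hpre
  unfold Spec_get_percentage_mgs
  have h := hpre
  unfold Pre_get_percentage_mgs at h
  simp only [List.mem_cons, List.not_mem_nil, or_false] at h
  rcases h with h | h | h <;>
    simp only [get_percentage_mgs, get_percentage_mgs_alt, h] <;>
    simp [PySem.Dict.get?, PySem.Dict.ofList, PySem.Dict.update, PySem.Dict.insert,
          PySem.Dict.contains, PySem.Dict.empty, pvFindMsg, List.countP, List.countP.go,
          Bool.cond_decide] <;>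
    split_ifs <;> simp_all <;> omega
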